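-- pv_equiv track=rewrite | github.com/ddofer/asap | py/cleavepred/api.py | _get_cleavage_products
-- ===== SOURCE A (Python) =====
-- def _get_cleavage_products(seq, cleavage_mask):
--
--     products = []
--     current_product = ''
--
--     for aa, label in zip(seq, cleavage_mask):
--         if label == '1':
--             _add_if_not_empty(products, current_product)
--             current_product = ''
--         else:
--             current_product += aa
--
--     _add_if_not_empty(products, current_product)
--     return products
--
-- def _add_if_not_empty(array, string):
--     if len(string) > 0:
--         array += [string]
-- ===== SOURCE B (Python) =====
-- def _get_cleavage_products(seq, cleavage_mask):
--     # Build run-length groups keyed on "is a cleavage position", then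
--     # join and keep only the non-cleavage runs.
--     runs = []
--     for aa, label in zip(seq, cleavage_mask):
--         is_cut = label == '1'
--         if runs and runs[-1][0] == is_cut:
--             runs[-1][1].append(aa)
--         else:
--             runs.append((is_cut, [aa]))
--     return [''.join(chars) for is_cut, chars in runs if not is_cut]
-- ===== Notes on version B (the rewrite author's own statement) =====
-- stated objective: alternative
-- what changed: B first builds a run-length grouping of the zipped (residue,label) pairs keyed on label=='1', then joins and keeps the non-cleavage runs, instead of A's single accumulator string with flush-on-separator.
import Mathlib
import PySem

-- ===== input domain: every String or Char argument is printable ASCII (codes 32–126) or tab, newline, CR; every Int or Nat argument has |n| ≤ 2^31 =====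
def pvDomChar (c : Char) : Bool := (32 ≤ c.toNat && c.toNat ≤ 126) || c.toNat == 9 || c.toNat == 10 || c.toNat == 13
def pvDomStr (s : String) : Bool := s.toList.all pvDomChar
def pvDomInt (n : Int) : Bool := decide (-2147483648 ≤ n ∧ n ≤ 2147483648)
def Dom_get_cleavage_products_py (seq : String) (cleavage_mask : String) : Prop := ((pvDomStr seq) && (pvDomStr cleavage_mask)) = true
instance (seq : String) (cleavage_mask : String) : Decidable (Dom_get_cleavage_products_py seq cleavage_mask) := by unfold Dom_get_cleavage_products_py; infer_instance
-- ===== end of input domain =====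

-- B replaces A's accumulator-string-with-flush loop by a run-length grouping of the
-- zipped pairs followed by a join-and-filter pass (alternative decomposition, same cost).

-- ===== PORT A =====
-- helper _add_if_not_empty (current_product is carried as List Char; '+=' aa is cs ++ [aa])
def pvAddIfNotEmpty (arr : List String) (cs : List Char) : List String :=
  if cs.length > 0 then arr ++ [String.mk cs] else arr

-- body of A's for-loop
def pvStepA (st : List String × List Char) (p : Char × Char) : List String × List Char :=
  if p.2 == '1' then (pvAddIfNotEmpty st.1 st.2, []) else (st.1, st.2 ++ [p.1])

def get_cleavage_products_py (seq : String) (cleavage_mask : String) : List String :=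
  let st := (List.zip seq.toList cleavage_mask.toList).foldl pvStepA ([], [])
  pvAddIfNotEmpty st.1 st.2

-- ===== PORT B =====
-- body of B's for-loop: extend the last run if its key matches, else open a new run
def pvRunStep (runs : List (Bool × List Char)) (p : Char × Char) : List (Bool × List Char) :=
  let k := p.2 == '1'
  match runs.getLast? with
  | some (k', cs) => if k' == k then runs.dropLast ++ [(k', cs ++ [p.1])] else runs ++ [(k, [p.1])]
  | none => runs ++ [(k, [p.1])]

def get_cleavage_products_py_alt (seq : String) (cleavage_mask : String) : List String :=
  let runs := (List.zip seq.toList cleavage_mask.toList).foldl pvRunStep []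
  runs.filterMap (fun r => if r.1 then none else some (String.mk r.2))

-- ===== PRECONDITION & SPEC =====
def Spec_get_cleavage_products_py (seq : String) (cleavage_mask : String) (out : List String) : Prop := out = get_cleavage_products_py_alt seq cleavage_mask
instance (seq : String) (cleavage_mask : String) (out : List String) : Decidable (Spec_get_cleavage_products_py seq cleavage_mask out) := by unfold Spec_get_cleavage_products_py; infer_instance

-- ===== CLAIM (what is proved, stated in full; the proofs are below) =====
def Claim_equal_get_cleavage_products_py : Prop := ∀ (seq : String) (cleavage_mask : String), Dom_get_cleavage_products_py seq cleavage_mask → Spec_get_cleavage_products_py seq cleavage_mask (get_cleavage_products_py seq cleavage_mask)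

-- ===== LEMMAS AND PROOFS =====

def pvOut (runs : List (Bool × List Char)) : List String :=
  runs.filterMap (fun r => if r.1 then none else some (String.mk r.2))

def pvNe (cs : List Char) : List String :=
  if cs.length > 0 then [String.mk cs] else []

-- invariant relating A's state (products, current) to B's run list
def pvR (ps : List String) (cur : List Char) (runs : List (Bool × List Char)) : Prop :=
  pvOut runs = ps ++ pvNe cur ∧
  (match runs.getLast? with
   | some (false, cs) => cs = cur ∧ cur ≠ []
   | some (true, _) => cur = []
   | none => cur = [])

lemma pvAdd_eq (arr : List String) (cs : List Char) :
    pvAddIfNotEmpty arr cs = arr ++ pvNe cs := by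
  unfold pvAddIfNotEmpty pvNe
  split <;> simp

lemma pvOut_append (xs ys : List (Bool × List Char)) :
    pvOut (xs ++ ys) = pvOut xs ++ pvOut ys := by
  simp [pvOut]

lemma pvR_step (ps : List String) (cur : List Char) (runs : List (Bool × List Char))
    (p : Char × Char) (h : pvR ps cur runs) :
    pvR (pvStepA (ps, cur) p).1 (pvStepA (ps, cur) p).2 (pvRunStep runs p) := by
  obtain ⟨hout, hlast⟩ := h
  cases hb : (p.2 == '1') <;>
  · unfold pvStepA pvRunStep
    rcases hr : runs.getLast? with _ | ⟨k', cs⟩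
    · -- runs = []
      have hnil : runs = [] := List.getLast?_eq_none_iff.mp hr
      rw [hr] at hlast
      subst hnil
      simp only at hlast
      subst hlast
      simp [pvOut, pvNe] at hout
      constructor <;> simp [hb, pvOut, pvNe, pvAdd_eq, hout]
    · obtain ⟨init, hruns⟩ := List.getLast?_eq_some_iff.mp hr
      rw [hr] at hlast
      subst hruns
      rw [pvOut_append] at hout
      rcases k' with _ | _
      · -- last run is a keep-run: cs = cur ≠ []
        obtain ⟨hcs, hne⟩ := hlast
        subst hcs
        have hcs0 : 0 < cs.length := List.length_pos_iff.mpr hne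
        simp [pvOut, pvNe, hcs0] at hout
        constructor <;>
          simp [hb, pvAdd_eq, pvOut, pvNe, hcs0, hout]
      · -- last run is a cut-run: cur = []
        simp only at hlast
        subst hlast
        simp [pvOut, pvNe] at hout
        constructor <;>
          simp [hb, pvAdd_eq, pvOut, pvNe, hout]

lemma pvMain : ∀ (l : List (Char × Char)) (ps : List String) (cur : List Char)
    (runs : List (Bool × List Char)), pvR ps cur runs →
    pvAddIfNotEmpty (l.foldl pvStepA (ps, cur)).1 (l.foldl pvStepA (ps, cur)).2
      = pvOut (l.foldl pvRunStep runs) := by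
  intro l
  induction l with
  | nil =>
    intro ps cur runs h
    simpa [pvAdd_eq] using h.1.symm
  | cons p l ih =>
    intro ps cur runs h
    have hstep := pvR_step ps cur runs p h
    simpa using ih (pvStepA (ps, cur) p).1 (pvStepA (ps, cur) p).2 (pvRunStep runs p) hstep

-- ===== VERDICT (by name: the statement is the Claim_ definition above) =====
theorem get_cleavage_products_py_spec : Claim_equal_get_cleavage_products_py := by
  intro seq cleavage_mask _
  unfold Spec_get_cleavage_products_py get_cleavage_products_py get_cleavage_products_py_alt
  exact pvMain _ [] [] [] ⟨rfl, rfl⟩
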